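-- pv_equiv track=rewrite | github.com/iacanaw/aes_sca_comparison | simple/subbyte_demo.py | gf256_mul
-- ===== SOURCE A (Python) =====
-- AES_REDUCTION = 0x1B  # because modulus is 0x11B; reduction step uses 0x1B for low 8 bits
--
-- def gf256_mul(a: int, b: int) -> int:
--     """
--     Multiply two bytes in GF(2^8) with AES modulus (0x11B), using only bitwise ops.
--
--     Classic "Russian peasant" method:
--       - Accumulate into p when LSB of b is 1
--       - xtime() on a each step (shift left, reduce by 0x1B if overflow bit was set)
--       - shift b right
--     """
--     a &= 0xFF
--     b &= 0xFF
--     p = 0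
--     for _ in range(8):
--         if b & 1:
--             p ^= a
--         hi = a & 0x80
--         a = (a << 1) & 0xFF
--         if hi:
--             a ^= AES_REDUCTION
--         b >>= 1
--     return p & 0xFF
-- ===== SOURCE B (Python) =====
-- AES_REDUCTION = 0x1B
--
-- def _build_tables():
--     # exp[i] = 3^i in GF(2^8), log[x] = discrete log base 3 (x != 0)
--     exp = [0] * 256
--     log = [0] * 256
--     cur = 1
--     for i in range(255):
--         exp[i] = cur
--         log[cur] = i
--         hi = cur & 0x80
--         d = (cur << 1) & 0xFF
--         if hi:
--             d ^= AES_REDUCTION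
--         cur ^= d  # cur *= 3
--     exp[255] = exp[0]
--     return exp, log
--
-- _EXP, _LOG = _build_tables()
--
-- def gf256_mul(a: int, b: int) -> int:
--     a &= 0xFF
--     b &= 0xFF
--     if a == 0 or b == 0:
--         return 0
--     return _EXP[(_LOG[a] + _LOG[b]) % 255]
-- ===== Notes on version B (the rewrite author's own statement) =====
-- stated objective: faster
-- what changed: Replaces the per-call 8-round Russian-peasant bit loop with GF(2^8) log/antilog tables (generator 3) built once at module load, so each call is two table lookups and a mod-255 addition.
import Mathlib
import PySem

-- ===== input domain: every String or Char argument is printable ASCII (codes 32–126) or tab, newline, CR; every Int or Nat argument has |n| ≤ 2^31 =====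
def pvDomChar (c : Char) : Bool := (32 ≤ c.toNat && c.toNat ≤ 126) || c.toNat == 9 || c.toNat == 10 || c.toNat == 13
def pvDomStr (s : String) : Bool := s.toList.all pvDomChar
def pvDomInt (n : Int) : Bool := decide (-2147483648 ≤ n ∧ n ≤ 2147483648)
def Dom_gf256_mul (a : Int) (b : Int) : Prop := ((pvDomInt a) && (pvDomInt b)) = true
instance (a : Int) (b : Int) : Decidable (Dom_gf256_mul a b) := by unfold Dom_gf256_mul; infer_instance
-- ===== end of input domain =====

-- B replaces A's per-call 8-round Russian-peasant loop by GF(2^8) log/antilog tables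
-- (generator 3) built once at module load; each call is then two lookups and a mod-255 add.

-- ===== PORT A =====
-- loop body of A's `for _ in range(8)`: state (a, b, p)
def gfStep (st : Int × Int × Int) (_ : Int) : Int × Int × Int :=
  let p := if PySem.Int.band st.2.1 1 ≠ 0 then PySem.Int.bxor st.2.2 st.1 else st.2.2
  let hi := PySem.Int.band st.1 128
  let a := PySem.Int.band (st.1 <<< (1 : Nat)) 255
  let a := if hi ≠ 0 then PySem.Int.bxor a 27 else a
  (a, st.2.1 >>> (1 : Nat), p)

def gf256_mul (a : Int) (b : Int) : Int :=
  let a := PySem.Int.band a 255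
  let b := PySem.Int.band b 255
  let s := (PySem.List.pyRange 0 8 1).foldl gfStep (a, b, 0)
  PySem.Int.band s.2.2 255

-- ===== PORT B =====
-- loop body of B's `_build_tables` loop: state (exp, log, cur)
def pvBuildStep (st : List Int × List Int × Int) (i : Int) : List Int × List Int × Int :=
  let exp := PySem.List.pySetD st.1 i st.2.2
  let log := PySem.List.pySetD st.2.1 st.2.2 i
  let cur := st.2.2
  let hi := PySem.Int.band cur 128
  let d := PySem.Int.band (cur <<< (1 : Nat)) 255
  let d := if hi ≠ 0 then PySem.Int.bxor d 27 else d
  (exp, log, PySem.Int.bxor cur d)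

-- B's module-level (_EXP, _LOG) built once
def pvTables : List Int × List Int :=
  let s := (PySem.List.pyRange 0 255 1).foldl pvBuildStep
    (List.replicate 256 (0 : Int), List.replicate 256 (0 : Int), 1)
  (PySem.List.pySetD s.1 255 (PySem.List.pyGetD s.1 0 0), s.2.1)

def gf256_mul_alt (a : Int) (b : Int) : Int :=
  let a := PySem.Int.band a 255
  let b := PySem.Int.band b 255
  if a = 0 ∨ b = 0 then 0
  else
    PySem.List.pyGetD pvTables.1
      (PySem.Int.mod (PySem.List.pyGetD pvTables.2 a 0 + PySem.List.pyGetD pvTables.2 b 0) 255) 0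

-- ===== PRECONDITION & SPEC =====
def Spec_gf256_mul (a : Int) (b : Int) (out : Int) : Prop := out = gf256_mul_alt a b
instance (a : Int) (b : Int) (out : Int) : Decidable (Spec_gf256_mul a b out) := by unfold Spec_gf256_mul; infer_instance

-- ===== CLAIM (what is proved, stated in full; the proofs are below) =====
def Claim_equal_gf256_mul : Prop := ∀ (a : Int) (b : Int), Dom_gf256_mul a b → Spec_gf256_mul a b (gf256_mul a b)

-- ===== LEMMAS AND PROOFS =====

-- a & 0xFF on Int is reduction mod 256
theorem pv_maskb (a : Int) : PySem.Int.band a 255 = a.emod 256 := by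
  by_cases h : 0 ≤ a
  · rw [PySem.Int.band_of_nonneg h (by norm_num)]
    have h2 : a.toNat &&& (255 : Int).toNat = a.toNat % 256 := Nat.and_two_pow_sub_one_eq_mod a.toNat 8
    rw [h2]
    have : a % 256 = a.emod 256 := rfl
    omega
  · show PySem.Int.band a 255 = a.emod 256
    unfold PySem.Int.band
    rw [if_neg h, if_pos (by norm_num)]
    have h2 : (255 : Int).toNat &&& (-a - 1).toNat = (-a - 1).toNat % 256 := by
      rw [Nat.land_comm]; exact Nat.and_two_pow_sub_one_eq_mod _ 8
    rw [h2]
    have : a % 256 = a.emod 256 := rfl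
    omega

-- Nat model of A's loop: one xtime step, and k peasant rounds
def pvXt (a : Nat) : Nat := if a &&& 128 ≠ 0 then ((a <<< 1) &&& 255) ^^^ 27 else ((a <<< 1) &&& 255)

def pvG : Nat → Nat × Nat × Nat → Nat × Nat × Nat
  | 0, st => st
  | k + 1, (a, b, p) => pvG k (pvXt a, b >>> 1, if b &&& 1 ≠ 0 then p ^^^ a else p)

-- multiplication by 3 = 0b11, and powers of 3
def pvM3 (x : Nat) : Nat := x ^^^ pvXt x
def pvExp (i : Nat) : Nat := pvM3^[i] 1

theorem pv_step_cast (a b p : Nat) (i : Int) :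
    gfStep ((a : Int), (b : Int), (p : Int)) i =
      (((pvXt a : Nat) : Int), ((b >>> 1 : Nat) : Int),
        (((if b &&& 1 ≠ 0 then p ^^^ a else p : Nat) : Nat) : Int)) := by
  have e1 : (1 : Int) = ((1 : Nat) : Int) := rfl
  have e128 : (128 : Int) = ((128 : Nat) : Int) := rfl
  have e255 : (255 : Int) = ((255 : Nat) : Int) := rfl
  have e27 : (27 : Int) = ((27 : Nat) : Int) := rfl
  have esh : ((a : Int) <<< (1 : Nat)) = ((a <<< 1 : Nat) : Int) := Int.mem_toNat?.mp rfl
  have esr : ((b : Int) >>> (1 : Nat)) = ((b >>> 1 : Nat) : Int) := Int.mem_toNat?.mp rfl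
  simp only [gfStep, pvXt, esh, esr, e1, e128, e255, e27, PySem.Int.band_natCast,
    PySem.Int.bxor_natCast, Ne, Nat.cast_eq_zero]
  split_ifs <;> simp_all

theorem pv_fold_cast (l : List Int) (a b p : Nat) :
    l.foldl gfStep ((a : Int), (b : Int), (p : Int)) =
      (((pvG l.length (a, b, p)).1 : Int), ((pvG l.length (a, b, p)).2.1 : Int),
        ((pvG l.length (a, b, p)).2.2 : Int)) := by
  induction l generalizing a b p with
  | nil => simp [pvG]
  | cons x xs ih =>
    simp only [List.foldl_cons, pv_step_cast, List.length_cons, pvG]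
    exact ih _ _ _

theorem pvXt_lt (a : Nat) : pvXt a < 256 := by
  unfold pvXt
  split_ifs
  · exact Nat.xor_lt_two_pow (n := 8) (by have := Nat.and_le_right (n := a <<< 1) (m := 255); omega) (by norm_num)
  · have := Nat.and_le_right (n := a <<< 1) (m := 255); omega

theorem pvG_lt (k : Nat) (a b p : Nat) (ha : a < 256) (hp : p < 256) :
    (pvG k (a, b, p)).2.2 < 256 := by
  induction k generalizing a b p with
  | zero => exact hp
  | succ k ih =>
    refine ih _ _ _ (pvXt_lt a) ?_
    split_ifs
    · exact Nat.xor_lt_two_pow (n := 8) hp ha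
    · exact hp

-- A on byte inputs computes pvG
theorem pv_A_char (m n : Nat) (hm : m < 256) (hn : n < 256) :
    gf256_mul (m : Int) (n : Int) = ((pvG 8 (m, n, 0)).2.2 : Int) := by
  have e255 : (255 : Int) = ((255 : Nat) : Int) := rfl
  have hm' : m &&& 255 = m := by rw [Nat.and_two_pow_sub_one_eq_mod m 8]; omega
  have hn' : n &&& 255 = n := by rw [Nat.and_two_pow_sub_one_eq_mod n 8]; omega
  have hr : PySem.List.pyRange 0 8 1 = [0, 1, 2, 3, 4, 5, 6, 7] := by decide
  show (let a := PySem.Int.band (m : Int) 255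
        let b := PySem.Int.band (n : Int) 255
        let s := (PySem.List.pyRange 0 8 1).foldl gfStep (a, b, 0)
        PySem.Int.band s.2.2 255) = ((pvG 8 (m, n, 0)).2.2 : Int)
  rw [hr]
  simp only [e255, PySem.Int.band_natCast, hm', hn']
  have hf := pv_fold_cast [0, 1, 2, 3, 4, 5, 6, 7] m n 0
  rw [show ((0 : Nat) : Int) = (0 : Int) from rfl] at hf
  rw [hf]
  simp only [List.length_cons, List.length_nil, PySem.Int.band_natCast]
  norm_num
  have := pvG_lt 8 m n 0 hm (by norm_num)
  rw [Nat.and_two_pow_sub_one_eq_mod _ 8]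
  omega

-- literal values of B's tables
def pvLE : List Int := [1,3,5,15,17,51,85,255,26,46,114,150,161,248,19,53,95,225,56,72,216,115,149,164,247,2,6,10,30,34,102,170,229,52,92,228,55,89,235,38,106,190,217,112,144,171,230,49,83,245,4,12,20,60,68,204,79,209,104,184,211,110,178,205,76,212,103,169,224,59,77,215,98,166,241,8,24,40,120,136,131,158,185,208,107,189,220,127,129,152,179,206,73,219,118,154,181,196,87,249,16,48,80,240,11,29,39,105,187,214,97,163,254,25,43,125,135,146,173,236,47,113,147,174,233,32,96,160,251,22,58,78,210,109,183,194,93,231,50,86,250,21,63,65,195,94,226,61,71,201,64,192,91,237,44,116,156,191,218,117,159,186,213,100,172,239,42,126,130,157,188,223,122,142,137,128,155,182,193,88,232,35,101,175,234,37,111,177,200,67,197,84,252,31,33,99,165,244,7,9,27,45,119,153,176,203,70,202,69,207,74,222,121,139,134,145,168,227,62,66,198,81,243,14,18,54,90,238,41,123,141,140,143,138,133,148,167,242,13,23,57,75,221,124,132,151,162,253,28,36,108,180,199,82,246,1]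
def pvLL : List Int := [0,0,25,1,50,2,26,198,75,199,27,104,51,238,223,3,100,4,224,14,52,141,129,239,76,113,8,200,248,105,28,193,125,194,29,181,249,185,39,106,77,228,166,114,154,201,9,120,101,47,138,5,33,15,225,36,18,240,130,69,53,147,218,142,150,143,219,189,54,208,206,148,19,92,210,241,64,70,131,56,102,221,253,48,191,6,139,98,179,37,226,152,34,136,145,16,126,110,72,195,163,182,30,66,58,107,40,84,250,133,61,186,43,121,10,21,155,159,94,202,78,212,172,229,243,115,167,87,175,88,168,80,244,234,214,116,79,174,233,213,231,230,173,232,44,215,117,122,235,22,11,245,89,203,95,176,156,169,81,160,127,12,246,111,23,196,73,236,216,67,31,45,164,118,123,183,204,187,62,90,251,96,177,134,59,82,161,108,170,85,41,157,151,178,135,144,97,190,220,252,188,149,207,205,55,63,91,209,83,57,132,60,65,162,109,71,20,42,158,93,86,242,211,171,68,17,146,217,35,32,46,137,180,124,184,38,119,153,227,165,103,74,237,222,197,49,254,24,13,99,140,128,192,247,112,7]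
def pvLog (x : Nat) : Nat := (pvLL.getD x 0).toNat

set_option maxRecDepth 400000 in
theorem pv_tab : pvTables = (pvLE, pvLL) := by decide

set_option maxRecDepth 400000 in
theorem pv_exp_tab : ∀ k < 255, pvLE.getD k 0 = ((pvExp k : Nat) : Int) := by decide

set_option maxRecDepth 400000 in
theorem pv_log_tab : ∀ x < 256, pvLL.getD x 0 = ((pvLog x : Nat) : Int) ∧ pvLog x < 255 ∧
    (x ≠ 0 → pvExp (pvLog x) = x) := by decide

set_option maxRecDepth 400000 in
theorem pv_exp_255 : pvExp 255 = 1 := by decide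

set_option maxRecDepth 400000 in
theorem pv_one_mul : ∀ n < 256, (pvG 8 (1, n, 0)).2.2 = n := by decide

theorem pvXt_linear (x y : Nat) : pvXt (x ^^^ y) = pvXt x ^^^ pvXt y := by
  unfold pvXt
  have hd : (x ^^^ y) &&& 128 = (x &&& 128) ^^^ (y &&& 128) := Nat.and_xor_distrib_right
  have hx : x &&& 128 = (x.testBit 7).toNat * 128 := Nat.and_two_pow x 7
  have hy : y &&& 128 = (y.testBit 7).toNat * 128 := Nat.and_two_pow y 7
  have hsl : (x ^^^ y) <<< 1 = (x <<< 1) ^^^ (y <<< 1) := Nat.shiftLeft_xor_distrib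
  have hand : ((x <<< 1) ^^^ (y <<< 1)) &&& 255 = ((x <<< 1) &&& 255) ^^^ ((y <<< 1) &&& 255) :=
    Nat.and_xor_distrib_right
  cases hbx : x.testBit 7 <;> cases hby : y.testBit 7 <;>
    simp_all [Nat.xor_comm, Nat.xor_left_comm]

theorem pvG_linear (k : Nat) (b x y p q : Nat) :
    (pvG k (x ^^^ y, b, p ^^^ q)).2.2 = (pvG k (x, b, p)).2.2 ^^^ (pvG k (y, b, q)).2.2 := by
  induction k generalizing b x y p q with
  | zero => rfl
  | succ k ih =>
    show (pvG k (pvXt (x ^^^ y), b >>> 1, if b &&& 1 ≠ 0 then (p ^^^ q) ^^^ (x ^^^ y) else p ^^^ q)).2.2 = _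
    rw [pvXt_linear]
    have : (if b &&& 1 ≠ 0 then (p ^^^ q) ^^^ (x ^^^ y) else p ^^^ q) =
        (if b &&& 1 ≠ 0 then p ^^^ x else p) ^^^ (if b &&& 1 ≠ 0 then q ^^^ y else q) := by
      split_ifs with h
      · simp [Nat.xor_comm, Nat.xor_left_comm]
      · rfl
    rw [this]
    exact ih _ _ _ _ _

theorem pvG_xt (k : Nat) (b a p : Nat) :
    (pvG k (pvXt a, b, pvXt p)).2.2 = pvXt ((pvG k (a, b, p)).2.2) := by
  induction k generalizing b a p with
  | zero => rfl
  | succ k ih =>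
    show (pvG k (pvXt (pvXt a), b >>> 1, if b &&& 1 ≠ 0 then pvXt p ^^^ pvXt a else pvXt p)).2.2 = _
    have : (if b &&& 1 ≠ 0 then pvXt p ^^^ pvXt a else pvXt p) =
        pvXt (if b &&& 1 ≠ 0 then p ^^^ a else p) := by
      split_ifs with h
      · exact (pvXt_linear p a).symm
      · rfl
    rw [this]
    exact ih _ _ _

theorem pv_mul3 (a n : Nat) :
    (pvG 8 (pvM3 a, n, 0)).2.2 = pvM3 ((pvG 8 (a, n, 0)).2.2) := by
  unfold pvM3
  calc (pvG 8 (a ^^^ pvXt a, n, 0 ^^^ 0)).2.2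
      = (pvG 8 (a, n, 0)).2.2 ^^^ (pvG 8 (pvXt a, n, 0)).2.2 := pvG_linear 8 n a (pvXt a) 0 0
    _ = (pvG 8 (a, n, 0)).2.2 ^^^ pvXt ((pvG 8 (a, n, 0)).2.2) := by
        exact congrArg (fun z => (pvG 8 (a, n, 0)).2.2 ^^^ z) (pvG_xt 8 n a 0)

theorem pvExp_lt (i : Nat) : pvExp i < 256 := by
  induction i with
  | zero => norm_num [pvExp]
  | succ i ih =>
    have h : pvExp (i + 1) = pvM3 (pvExp i) := Function.iterate_succ_apply' pvM3 i 1
    rw [h]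
    exact Nat.xor_lt_two_pow (n := 8) ih (pvXt_lt _)

theorem pv_exp_mul (i j : Nat) : (pvG 8 (pvExp i, pvExp j, 0)).2.2 = pvExp (i + j) := by
  induction i with
  | zero =>
    rw [Nat.zero_add]
    exact pv_one_mul (pvExp j) (pvExp_lt j)
  | succ i ih =>
    have h1 : pvExp (i + 1) = pvM3 (pvExp i) := Function.iterate_succ_apply' pvM3 i 1
    have h2 : pvExp (i + j + 1) = pvM3 (pvExp (i + j)) := Function.iterate_succ_apply' pvM3 (i + j) 1
    calc (pvG 8 (pvExp (i + 1), pvExp j, 0)).2.2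
        = (pvG 8 (pvM3 (pvExp i), pvExp j, 0)).2.2 := by rw [h1]
      _ = pvM3 ((pvG 8 (pvExp i, pvExp j, 0)).2.2) := pv_mul3 _ _
      _ = pvM3 (pvExp (i + j)) := by rw [ih]
      _ = pvExp (i + 1 + j) := by rw [show i + 1 + j = i + j + 1 by omega, h2]

theorem pvExp_period (k : Nat) : pvExp (k + 255) = pvExp k := by
  unfold pvExp
  rw [Function.iterate_add_apply]
  have h : pvM3^[255] 1 = 1 := pv_exp_255
  rw [h]

theorem pvG_zero_left (k : Nat) (b p : Nat) : (pvG k (0, b, p)).2.2 = p := by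
  induction k generalizing b p with
  | zero => rfl
  | succ k ih =>
    show (pvG k (pvXt 0, b >>> 1, if b &&& 1 ≠ 0 then p ^^^ 0 else p)).2.2 = p
    have h : (if b &&& 1 ≠ 0 then p ^^^ 0 else p) = p := by split_ifs <;> simp
    rw [h, show pvXt 0 = 0 from rfl]
    exact ih _ _

theorem pvG_zero_right (k : Nat) (a p : Nat) : (pvG k (a, 0, p)).2.2 = p := by
  induction k generalizing a p with
  | zero => rfl
  | succ k ih =>
    show (pvG k (pvXt a, 0 >>> 1, if (0 : Nat) &&& 1 ≠ 0 then p ^^^ a else p)).2.2 = p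
    simp only [Nat.zero_shiftRight, Nat.zero_and, ne_eq, not_true_eq_false]
    exact ih _ _

-- the two Nat models agree on bytes
theorem pv_byte_eq (m n : Nat) (hm : m < 256) (hn : n < 256) :
    (pvG 8 (m, n, 0)).2.2 =
      (if m = 0 ∨ n = 0 then 0 else pvExp ((pvLog m + pvLog n) % 255)) := by
  by_cases h : m = 0 ∨ n = 0
  · rw [if_pos h]
    rcases h with h | h
    · subst h; exact pvG_zero_left 8 n 0
    · subst h; exact pvG_zero_right 8 m 0
  · push Not at h
    rw [if_neg (by tauto)]
    obtain ⟨_, hm1, hm2⟩ := pv_log_tab m hm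
    obtain ⟨_, hn1, hn2⟩ := pv_log_tab n hn
    have hm2' := hm2 h.1
    have hn2' := hn2 h.2
    have key := pv_exp_mul (pvLog m) (pvLog n)
    rw [hm2', hn2'] at key
    rw [key]
    by_cases hlt : pvLog m + pvLog n < 255
    · rw [Nat.mod_eq_of_lt hlt]
    · have hmod : (pvLog m + pvLog n) % 255 = pvLog m + pvLog n - 255 := by omega
      rw [hmod, ← pvExp_period (pvLog m + pvLog n - 255),
        show pvLog m + pvLog n - 255 + 255 = pvLog m + pvLog n by omega]

-- B on byte inputs
theorem pv_B_char (m n : Nat) (hm : m < 256) (hn : n < 256) :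
    gf256_mul_alt (m : Int) (n : Int) =
      (if m = 0 ∨ n = 0 then 0 else ((pvExp ((pvLog m + pvLog n) % 255) : Nat) : Int)) := by
  have e255 : (255 : Int) = ((255 : Nat) : Int) := rfl
  have hm' : m &&& 255 = m := by rw [Nat.and_two_pow_sub_one_eq_mod m 8]; omega
  have hn' : n &&& 255 = n := by rw [Nat.and_two_pow_sub_one_eq_mod n 8]; omega
  obtain ⟨hmL, hm1, _⟩ := pv_log_tab m hm
  obtain ⟨hnL, hn1, _⟩ := pv_log_tab n hn
  show (let a := PySem.Int.band (m : Int) 255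
        let b := PySem.Int.band (n : Int) 255
        if a = 0 ∨ b = 0 then 0
        else
          PySem.List.pyGetD pvTables.1
            (PySem.Int.mod (PySem.List.pyGetD pvTables.2 a 0 + PySem.List.pyGetD pvTables.2 b 0) 255) 0) = _
  simp only [e255, PySem.Int.band_natCast, hm', hn', pv_tab, Nat.cast_eq_zero,
    PySem.List.pyGetD_natCast, hmL, hnL]
  rw [show ((pvLog m : Nat) : Int) + ((pvLog n : Nat) : Int) = ((pvLog m + pvLog n : Nat) : Int) by push_cast; ring]
  rw [show PySem.Int.mod ((pvLog m + pvLog n : Nat) : Int) (((255 : Nat) : Int)) =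
        (((pvLog m + pvLog n) % 255 : Nat) : Int) from PySem.Int.mod_natCast _ _]
  rw [PySem.List.pyGetD_natCast]
  rw [pv_exp_tab _ (by omega)]

theorem pv_A_mask (a b : Int) :
    gf256_mul a b = gf256_mul (a.emod 256) (b.emod 256) := by
  have h1 : PySem.Int.band (a.emod 256) 255 = PySem.Int.band a 255 := by
    rw [pv_maskb, pv_maskb]; exact Int.emod_emod_of_dvd a (dvd_refl 256)
  have h2 : PySem.Int.band (b.emod 256) 255 = PySem.Int.band b 255 := by
    rw [pv_maskb, pv_maskb]; exact Int.emod_emod_of_dvd b (dvd_refl 256)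
  simp only [gf256_mul, h1, h2]

theorem pv_B_mask (a b : Int) :
    gf256_mul_alt a b = gf256_mul_alt (a.emod 256) (b.emod 256) := by
  have h1 : PySem.Int.band (a.emod 256) 255 = PySem.Int.band a 255 := by
    rw [pv_maskb, pv_maskb]; exact Int.emod_emod_of_dvd a (dvd_refl 256)
  have h2 : PySem.Int.band (b.emod 256) 255 = PySem.Int.band b 255 := by
    rw [pv_maskb, pv_maskb]; exact Int.emod_emod_of_dvd b (dvd_refl 256)
  simp only [gf256_mul_alt, h1, h2]

-- ===== VERDICT (by name: the statement is the Claim_ definition above) =====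
theorem gf256_mul_spec : Claim_equal_gf256_mul := by
  intro a b _
  unfold Spec_gf256_mul
  rw [pv_A_mask, pv_B_mask]
  have h1 : 0 ≤ a.emod 256 := Int.emod_nonneg a (by norm_num)
  have h2 : a.emod 256 < 256 := Int.emod_lt_of_pos a (by norm_num)
  have h3 : 0 ≤ b.emod 256 := Int.emod_nonneg b (by norm_num)
  have h4 : b.emod 256 < 256 := Int.emod_lt_of_pos b (by norm_num)
  rw [show a.emod 256 = (((a.emod 256).toNat : Nat) : Int) by omega,
      show b.emod 256 = (((b.emod 256).toNat : Nat) : Int) by omega]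
  rw [pv_A_char _ _ (by omega) (by omega), pv_B_char _ _ (by omega) (by omega)]
  rw [pv_byte_eq _ _ (by omega) (by omega)]
  split <;> simp
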